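-- pv_equiv track=rewrite | github.com/Nagarohit29/Satellite-Telemetry-Anomaly-Detection | Middleware/services/llm_service.py | _select_cloud_model
-- ===== SOURCE A (Python) =====
-- def _default_cloud_ollama_model() -> str:
--     return "gpt-oss:20b"
--
-- def _select_cloud_model(available_names: list[str]) -> str:
--     preferred_models = [
--         "gpt-oss:20b",
--         "gpt-oss:120b",
--         "glm-4.7",
--         "minimax-m2.1",
--         "minimax-m2.5",
--         "gemma3:4b",
--         "gemma3:12b",
--     ]
--     for preferred in preferred_models:
--         if preferred in available_names:
--             return preferred
--     return available_names[0] if available_names else _default_cloud_ollama_model()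
-- ===== SOURCE B (Python) =====
-- def _select_cloud_model(available_names: list[str]) -> str:
--     preferred_models = [
--         "gpt-oss:20b",
--         "gpt-oss:120b",
--         "glm-4.7",
--         "minimax-m2.1",
--         "minimax-m2.5",
--         "gemma3:4b",
--         "gemma3:12b",
--     ]
--     rank = {name: i for i, name in enumerate(preferred_models)}
--     if not available_names:
--         return "gpt-oss:20b"
--     # min keeps the FIRST element of minimal rank, so with no preferred model
--     # present every rank is len(preferred_models) and this is available_names[0]
--     return min(available_names, key=lambda n: rank.get(n, len(preferred_models)))
-- ===== Notes on version B (the rewrite author's own statement) =====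
-- stated objective: idiomatic
-- what changed: Instead of scanning the preference list and testing membership in available_names for each entry, B builds a rank dict from the preference list and takes min(available_names, key=rank) in a single pass over available_names, with min's first-tie rule giving the available_names[0] fallback.
import Mathlib
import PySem

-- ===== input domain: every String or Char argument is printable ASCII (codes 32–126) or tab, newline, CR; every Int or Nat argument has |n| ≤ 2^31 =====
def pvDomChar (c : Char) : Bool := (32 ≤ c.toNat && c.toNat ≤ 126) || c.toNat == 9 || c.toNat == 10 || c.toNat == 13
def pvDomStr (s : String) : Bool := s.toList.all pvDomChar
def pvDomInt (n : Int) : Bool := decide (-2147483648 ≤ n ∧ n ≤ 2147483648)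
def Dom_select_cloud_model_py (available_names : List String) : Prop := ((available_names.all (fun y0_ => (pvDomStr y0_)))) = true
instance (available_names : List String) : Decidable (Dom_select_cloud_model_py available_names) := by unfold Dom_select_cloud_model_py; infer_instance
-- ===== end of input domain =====

-- B replaces A's scan over the preference list by a rank dictionary and a single
-- min-by-rank pass over available_names (objective: idiomatic; same behaviour).


-- ===== PORT A =====
-- helper _default_cloud_ollama_model
def pvDefaultCloudOllamaModel : String := "gpt-oss:20b"

-- the 'for preferred in preferred_models: if preferred in available_names: return preferred' loop
def pvLoopA (preferred avail : List String) : Option String :=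
  match preferred with
  | [] => none
  | p :: ps => if avail.contains p then some p else pvLoopA ps avail

def select_cloud_model_py (available_names : List String) : String :=
  match pvLoopA ["gpt-oss:20b", "gpt-oss:120b", "glm-4.7", "minimax-m2.1",
                 "minimax-m2.5", "gemma3:4b", "gemma3:12b"] available_names with
  | some p => p
  | none =>
    match available_names with
    | [] => pvDefaultCloudOllamaModel
    | x :: _ => x

-- ===== PORT B =====
def pvPreferredB : List String :=
  ["gpt-oss:20b", "gpt-oss:120b", "glm-4.7", "minimax-m2.1", "minimax-m2.5", "gemma3:4b", "gemma3:12b"]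

-- rank = {name: i for i, name in enumerate(preferred_models)}
def pvRankB : PySem.Dict String Int :=
  (PySem.List.enumerate pvPreferredB 0).foldl (fun d p => d.insert p.2 p.1) PySem.Dict.empty

-- lambda n: rank.get(n, len(preferred_models))
def pvKeyB (n : String) : Int := PySem.Dict.getD pvRankB n (pvPreferredB.length : Int)

def select_cloud_model_py_alt (available_names : List String) : String :=
  if available_names.isEmpty then "gpt-oss:20b"
  else (PySem.List.min? available_names pvKeyB).getD "gpt-oss:20b"

-- ===== PRECONDITION & SPEC =====
def Spec_select_cloud_model_py (available_names : List String) (out : String) : Prop := out = select_cloud_model_py_alt available_names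
instance (available_names : List String) (out : String) : Decidable (Spec_select_cloud_model_py available_names out) := by unfold Spec_select_cloud_model_py; infer_instance

-- ===== CLAIM (what is proved, stated in full; the proofs are below) =====
def Claim_equal_select_cloud_model_py : Prop := ∀ (available_names : List String), Dom_select_cloud_model_py available_names → Spec_select_cloud_model_py available_names (select_cloud_model_py available_names)

-- ===== LEMMAS AND PROOFS =====

-- closed form of the rank-dict lookup
def rfun (n : String) : Int :=
  if n = "gemma3:12b" then 6 else if n = "gemma3:4b" then 5 else if n = "minimax-m2.5" then 4
  else if n = "minimax-m2.1" then 3 else if n = "glm-4.7" then 2 else if n = "gpt-oss:120b" then 1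
  else if n = "gpt-oss:20b" then 0 else 7

theorem pvKeyB_eq (n : String) : pvKeyB n = rfun n := by
  simp [pvKeyB, pvRankB, pvPreferredB, PySem.List.enumerate, PySem.Dict.getD_insert,
        PySem.Dict.getD_empty, rfun]

theorem rfun_cases (n : String) :
    rfun n = 0 ∨ rfun n = 1 ∨ rfun n = 2 ∨ rfun n = 3 ∨ rfun n = 4 ∨ rfun n = 5 ∨ rfun n = 6 ∨ rfun n = 7 := by
  unfold rfun; split_ifs <;> simp

theorem rfun_inv (n : String) :
    (rfun n = 0 → n = "gpt-oss:20b") ∧ (rfun n = 1 → n = "gpt-oss:120b") ∧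
    (rfun n = 2 → n = "glm-4.7") ∧ (rfun n = 3 → n = "minimax-m2.1") ∧
    (rfun n = 4 → n = "minimax-m2.5") ∧ (rfun n = 5 → n = "gemma3:4b") ∧
    (rfun n = 6 → n = "gemma3:12b") := by
  unfold rfun; split_ifs <;> simp_all

-- min over a nonempty list as a plain foldl
theorem min?_cons_foldl (t : List String) (a : String) :
    PySem.List.min? (a :: t) pvKeyB =
      some (t.foldl (fun m x => if pvKeyB x < pvKeyB m then x else m) a) := by
  simp only [PySem.List.min?, List.foldl_cons]
  induction t generalizing a with
  | nil => rfl
  | cons x t ih =>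
    simp only [List.foldl_cons]
    by_cases h : pvKeyB x < pvKeyB a <;> simp [h, ih]

-- if nothing beats the accumulator, the fold keeps it
theorem foldl_stay (l : List String) (b : String)
    (h : ∀ x ∈ l, ¬ pvKeyB x < pvKeyB b) :
    l.foldl (fun m x => if pvKeyB x < pvKeyB m then x else m) b = b := by
  induction l with
  | nil => rfl
  | cons x l ih =>
    simp only [List.foldl_cons, if_neg (h x (by simp))]
    exact ih (fun y hy => h y (by simp [hy]))

-- the fold finds the unique strict minimum v
theorem foldl_first_min (v : String) :
    ∀ (l : List String) (b : String),
      (∀ x ∈ l, pvKeyB v ≤ pvKeyB x) → (∀ x ∈ l, pvKeyB x = pvKeyB v → x = v) →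
      pvKeyB v ≤ pvKeyB b → (pvKeyB b = pvKeyB v → b = v) → (v ∈ l ∨ b = v) →
      l.foldl (fun m x => if pvKeyB x < pvKeyB m then x else m) b = v := by
  intro l
  induction l with
  | nil =>
    intro b _ _ _ _ hin
    simpa using hin
  | cons x l ih =>
    intro b hle huniq hb hbv hin
    simp only [List.foldl_cons]
    have hxle : pvKeyB v ≤ pvKeyB x := hle x (by simp)
    have hxv : pvKeyB x = pvKeyB v → x = v := huniq x (by simp)
    by_cases hlt : pvKeyB x < pvKeyB b
    · simp only [if_pos hlt]
      refine ih x (fun y hy => hle y (by simp [hy])) (fun y hy => huniq y (by simp [hy]))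
        hxle hxv ?_
      rcases hin with hv | rfl
      · rcases List.mem_cons.mp hv with rfl | hv
        · right; rfl
        · left; exact hv
      · omega
    · simp only [if_neg hlt]
      refine ih b (fun y hy => hle y (by simp [hy])) (fun y hy => huniq y (by simp [hy]))
        hb hbv ?_
      rcases hin with hv | rfl
      · rcases List.mem_cons.mp hv with rfl | hv
        · right
          exact (hbv (by omega)).symm ▸ rfl
        · left; exact hv
      · right; rfl
  -- note: in the hlt branch with b = v, pvKeyB x < pvKeyB v contradicts hxle; omega closes it

-- B on a nonempty list returns the first element of minimal rank
theorem alt_eq_min (a : String) (t : List String) (v : String)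
    (hv : v ∈ a :: t)
    (hmin : ∀ x ∈ a :: t, rfun v ≤ rfun x)
    (huniq : ∀ x, rfun x = rfun v → x = v) :
    select_cloud_model_py_alt (a :: t) = v := by
  have hk : ∀ n, pvKeyB n = rfun n := pvKeyB_eq
  have : t.foldl (fun m x => if pvKeyB x < pvKeyB m then x else m) a = v := by
    apply foldl_first_min v t a
    · intro y hy; rw [hk, hk]; exact hmin y (by simp [hy])
    · intro y _ h; exact huniq y (by rw [← hk y, ← hk v]; exact h)
    · rw [hk, hk]; exact hmin a (by simp)
    · intro h; exact huniq a (by rw [← hk a, ← hk v]; exact h)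
    · rcases List.mem_cons.mp hv with rfl | hv
      · right; rfl
      · left; exact hv
  simp [select_cloud_model_py_alt, min?_cons_foldl, this]

theorem rfun_ge_of_not_mem (l : List String) (x : String) (hx : x ∈ l) (k : Int)
    (h0 : ¬ "gpt-oss:20b" ∈ l ∨ (0:Int) ≥ k) (h1 : ¬ "gpt-oss:120b" ∈ l ∨ (1:Int) ≥ k)
    (h2 : ¬ "glm-4.7" ∈ l ∨ (2:Int) ≥ k) (h3 : ¬ "minimax-m2.1" ∈ l ∨ (3:Int) ≥ k)
    (h4 : ¬ "minimax-m2.5" ∈ l ∨ (4:Int) ≥ k) (h5 : ¬ "gemma3:4b" ∈ l ∨ (5:Int) ≥ k)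
    (h6 : ¬ "gemma3:12b" ∈ l ∨ (6:Int) ≥ k) (hk : k ≤ 7) :
    k ≤ rfun x := by
  have hinv := rfun_inv x
  rcases rfun_cases x with h | h | h | h | h | h | h | h <;>
    [ (rcases h0 with hm | hge); (rcases h1 with hm | hge); (rcases h2 with hm | hge);
      (rcases h3 with hm | hge); (rcases h4 with hm | hge); (rcases h5 with hm | hge);
      (rcases h6 with hm | hge); skip ] <;>
    first
      | omega
      | (exfalso; apply hm; obtain ⟨i0, i1, i2, i3, i4, i5, i6⟩ := hinv
         first
           | exact (i0 h) ▸ hx | exact (i1 h) ▸ hx | exact (i2 h) ▸ hx | exact (i3 h) ▸ hx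
           | exact (i4 h) ▸ hx | exact (i5 h) ▸ hx | exact (i6 h) ▸ hx)

-- ===== VERDICT (by name: the statement is the Claim_ definition above) =====
theorem select_cloud_model_py_spec : Claim_equal_select_cloud_model_py := by
  unfold Claim_equal_select_cloud_model_py
  intro avail _
  unfold Spec_select_cloud_model_py
  match avail with
  | [] => rfl
  | a :: t =>
      by_cases m0 : "gpt-oss:20b" ∈ a :: t
      · have hA : select_cloud_model_py (a :: t) = "gpt-oss:20b" := by
          simp [select_cloud_model_py, pvLoopA, m0]
        have hV : rfun "gpt-oss:20b" = 0 := by decide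
        rw [hA]
        refine (alt_eq_min a t "gpt-oss:20b" m0 ?_ ?_).symm
        · intro x hx
          rw [hV]
          exact rfun_ge_of_not_mem (a :: t) x hx 0 (Or.inr (by norm_num)) (Or.inr (by norm_num)) (Or.inr (by norm_num)) (Or.inr (by norm_num)) (Or.inr (by norm_num)) (Or.inr (by norm_num)) (Or.inr (by norm_num)) (by norm_num)
        · intro x h
          rw [hV] at h
          exact (rfun_inv x).1 h
      ·
        by_cases m1 : "gpt-oss:120b" ∈ a :: t
        · have hA : select_cloud_model_py (a :: t) = "gpt-oss:120b" := by
            simp [select_cloud_model_py, pvLoopA, m0, m1]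
          have hV : rfun "gpt-oss:120b" = 1 := by decide
          rw [hA]
          refine (alt_eq_min a t "gpt-oss:120b" m1 ?_ ?_).symm
          · intro x hx
            rw [hV]
            exact rfun_ge_of_not_mem (a :: t) x hx 1 (Or.inl m0) (Or.inr (by norm_num)) (Or.inr (by norm_num)) (Or.inr (by norm_num)) (Or.inr (by norm_num)) (Or.inr (by norm_num)) (Or.inr (by norm_num)) (by norm_num)
          · intro x h
            rw [hV] at h
            exact (rfun_inv x).2.1 h
        ·
          by_cases m2 : "glm-4.7" ∈ a :: t
          · have hA : select_cloud_model_py (a :: t) = "glm-4.7" := by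
              simp [select_cloud_model_py, pvLoopA, m0, m1, m2]
            have hV : rfun "glm-4.7" = 2 := by decide
            rw [hA]
            refine (alt_eq_min a t "glm-4.7" m2 ?_ ?_).symm
            · intro x hx
              rw [hV]
              exact rfun_ge_of_not_mem (a :: t) x hx 2 (Or.inl m0) (Or.inl m1) (Or.inr (by norm_num)) (Or.inr (by norm_num)) (Or.inr (by norm_num)) (Or.inr (by norm_num)) (Or.inr (by norm_num)) (by norm_num)
            · intro x h
              rw [hV] at h
              exact (rfun_inv x).2.2.1 h
          ·
            by_cases m3 : "minimax-m2.1" ∈ a :: t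
            · have hA : select_cloud_model_py (a :: t) = "minimax-m2.1" := by
                simp [select_cloud_model_py, pvLoopA, m0, m1, m2, m3]
              have hV : rfun "minimax-m2.1" = 3 := by decide
              rw [hA]
              refine (alt_eq_min a t "minimax-m2.1" m3 ?_ ?_).symm
              · intro x hx
                rw [hV]
                exact rfun_ge_of_not_mem (a :: t) x hx 3 (Or.inl m0) (Or.inl m1) (Or.inl m2) (Or.inr (by norm_num)) (Or.inr (by norm_num)) (Or.inr (by norm_num)) (Or.inr (by norm_num)) (by norm_num)
              · intro x h
                rw [hV] at h
                exact (rfun_inv x).2.2.2.1 h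
            ·
              by_cases m4 : "minimax-m2.5" ∈ a :: t
              · have hA : select_cloud_model_py (a :: t) = "minimax-m2.5" := by
                  simp [select_cloud_model_py, pvLoopA, m0, m1, m2, m3, m4]
                have hV : rfun "minimax-m2.5" = 4 := by decide
                rw [hA]
                refine (alt_eq_min a t "minimax-m2.5" m4 ?_ ?_).symm
                · intro x hx
                  rw [hV]
                  exact rfun_ge_of_not_mem (a :: t) x hx 4 (Or.inl m0) (Or.inl m1) (Or.inl m2) (Or.inl m3) (Or.inr (by norm_num)) (Or.inr (by norm_num)) (Or.inr (by norm_num)) (by norm_num)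
                · intro x h
                  rw [hV] at h
                  exact (rfun_inv x).2.2.2.2.1 h
              ·
                by_cases m5 : "gemma3:4b" ∈ a :: t
                · have hA : select_cloud_model_py (a :: t) = "gemma3:4b" := by
                    simp [select_cloud_model_py, pvLoopA, m0, m1, m2, m3, m4, m5]
                  have hV : rfun "gemma3:4b" = 5 := by decide
                  rw [hA]
                  refine (alt_eq_min a t "gemma3:4b" m5 ?_ ?_).symm
                  · intro x hx
                    rw [hV]
                    exact rfun_ge_of_not_mem (a :: t) x hx 5 (Or.inl m0) (Or.inl m1) (Or.inl m2) (Or.inl m3) (Or.inl m4) (Or.inr (by norm_num)) (Or.inr (by norm_num)) (by norm_num)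
                  · intro x h
                    rw [hV] at h
                    exact (rfun_inv x).2.2.2.2.2.1 h
                ·
                  by_cases m6 : "gemma3:12b" ∈ a :: t
                  · have hA : select_cloud_model_py (a :: t) = "gemma3:12b" := by
                      simp [select_cloud_model_py, pvLoopA, m0, m1, m2, m3, m4, m5, m6]
                    have hV : rfun "gemma3:12b" = 6 := by decide
                    rw [hA]
                    refine (alt_eq_min a t "gemma3:12b" m6 ?_ ?_).symm
                    · intro x hx
                      rw [hV]
                      exact rfun_ge_of_not_mem (a :: t) x hx 6 (Or.inl m0) (Or.inl m1) (Or.inl m2) (Or.inl m3) (Or.inl m4) (Or.inl m5) (Or.inr (by norm_num)) (by norm_num)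
                    · intro x h
                      rw [hV] at h
                      exact (rfun_inv x).2.2.2.2.2.2 h
                  ·
                    have hA : select_cloud_model_py (a :: t) = a := by
                      simp [select_cloud_model_py, pvLoopA, m0, m1, m2, m3, m4, m5, m6]
                    have h7 : ∀ x ∈ a :: t, rfun x = 7 := by
                      intro x hx
                      have hge := rfun_ge_of_not_mem (a :: t) x hx 7 (Or.inl m0) (Or.inl m1) (Or.inl m2) (Or.inl m3) (Or.inl m4) (Or.inl m5) (Or.inl m6) (by norm_num)
                      rcases rfun_cases x with h | h | h | h | h | h | h | h <;> omega
                    have hst : t.foldl (fun m x => if pvKeyB x < pvKeyB m then x else m) a = a := by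
                      apply foldl_stay
                      intro x hx
                      rw [pvKeyB_eq, pvKeyB_eq, h7 x (by simp [hx]), h7 a (by simp)]
                      omega
                    rw [hA]
                    simp [select_cloud_model_py_alt, min?_cons_foldl, hst]
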